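-- pv_equiv track=rewrite | github.com/YichaoXu/Dataset-PHPCVEs | src/core/processor.py | _is_php_file
-- ===== SOURCE A (Python) =====
-- def _is_php_file(filename: str) -> bool:
--     """Check if a file is PHP-related based on its extension."""
--     if not filename:
--         return False
--
--     # Convert filename to lowercase for case-insensitive comparison
--     filename_lower = filename.lower()
--
--     # Check file extension
--     php_extensions = ['.php', '.phtml', '.php3', '.php4', '.php5', '.phps', '.inc']
--
--     # Also consider HTML files that might contain PHP
--     html_extensions = ['.html', '.htm']
--
--     # Direct PHP files (case-insensitive)
--     if any(filename_lower.endswith(ext) for ext in php_extensions):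
--         return True
--
--     # HTML files with PHP-related names (case-insensitive)
--     if any(filename_lower.endswith(ext) for ext in html_extensions):
--         php_indicators = ['php', 'wordpress', 'drupal', 'laravel', 'symfony']
--         if any(indicator in filename_lower for indicator in php_indicators):
--             return True
--
--     return False
-- ===== SOURCE B (Python) =====
-- _EXT_CAT = {
--     '.php': 'php', '.phtml': 'php', '.php3': 'php', '.php4': 'php',
--     '.php5': 'php', '.phps': 'php', '.inc': 'php',
--     '.html': 'html', '.htm': 'html',
-- }
--
--
-- def _build_dfa():
--     """Trie of the REVERSED extensions as a flat DFA table.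
--
--     States are ints; transitions map (state, char) -> state; accepting
--     states carry the category.  No extension is a suffix of another, so
--     accepting states are leaves of the trie.
--     """
--     trans = {}
--     accept = {}
--     fresh = 1
--     for ext, cat in _EXT_CAT.items():
--         state = 0
--         for ch in reversed(ext):
--             key = (state, ch)
--             if key not in trans:
--                 trans[key] = fresh
--                 fresh += 1
--             state = trans[key]
--         accept[state] = cat
--     return trans, accept
--
--
-- _TRANS, _ACCEPT = _build_dfa()
--
-- _PHP_INDICATORS = ('php', 'wordpress', 'drupal', 'laravel', 'symfony')
--
--
-- def _is_php_file(filename: str) -> bool: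
--     """Check if a file is PHP-related based on its extension."""
--     if not filename:
--         return False
--     filename_lower = filename.lower()
--     cat = None
--     state = 0
--     for ch in reversed(filename_lower):
--         nxt = _TRANS.get((state, ch))
--         if nxt is None:
--             break
--         state = nxt
--         if state in _ACCEPT:
--             cat = _ACCEPT[state]
--             break
--     if cat == 'php':
--         return True
--     if cat == 'html':
--         return any(ind in filename_lower for ind in _PHP_INDICATORS)
--     return False
-- ===== Notes on version B (the rewrite author's own statement) =====
-- stated objective: alternative
-- what changed: Instead of A's nine endswith suffix scans over two extension lists, B builds (once, at module level) a trie of the reversed extensions as a flat DFA transition table and classifies the name by a single backward character walk that stops at the first accepting state.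
import Mathlib
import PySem

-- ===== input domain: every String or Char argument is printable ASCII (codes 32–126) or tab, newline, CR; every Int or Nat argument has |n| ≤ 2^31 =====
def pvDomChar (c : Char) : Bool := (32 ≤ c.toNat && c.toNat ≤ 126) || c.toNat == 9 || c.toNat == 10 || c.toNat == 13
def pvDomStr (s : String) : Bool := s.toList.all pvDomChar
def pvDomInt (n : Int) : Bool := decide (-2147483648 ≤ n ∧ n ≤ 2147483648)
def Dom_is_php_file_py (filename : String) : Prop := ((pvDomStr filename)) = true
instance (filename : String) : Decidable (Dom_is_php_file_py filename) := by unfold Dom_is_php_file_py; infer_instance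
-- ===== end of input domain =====

-- B replaces A's nine endswith scans by a single backward character walk through a DFA
-- (a trie of the reversed extensions, built once as a flat transition table);
-- objective: alternative algorithm, same return value everywhere.

set_option maxRecDepth 8192

-- ===== PORT A =====
def is_php_file_py (filename : String) : Bool :=
  if filename = "" then false
  else
    let filename_lower := PySem.Str.lower filename
    let php_extensions := [".php", ".phtml", ".php3", ".php4", ".php5", ".phps", ".inc"]
    let html_extensions := [".html", ".htm"]
    if php_extensions.any (fun ext => PySem.Str.endswith filename_lower ext) then true
    else if html_extensions.any (fun ext => PySem.Str.endswith filename_lower ext) then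
      let php_indicators := ["php", "wordpress", "drupal", "laravel", "symfony"]
      if php_indicators.any (fun ind => PySem.Str.isIn ind filename_lower) then true
      else false
    else false

-- ===== PORT B =====
-- Source B's module-level constants and its _build_dfa(): a trie of the REVERSED extensions
-- as a flat DFA table {(state, char): state} with accepting states mapped to a category.
def pvExtCat : List (String × String) :=
  [(".php", "php"), (".phtml", "php"), (".php3", "php"), (".php4", "php"),
   (".php5", "php"), (".phps", "php"), (".inc", "php"),
   (".html", "html"), (".htm", "html")]

-- _build_dfa(): outer fold over (ext, cat); inner fold over reversed(ext) threads
-- (trans, fresh, state), exactly as the Python loop does.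
def pvBuildDFA : PySem.Dict (Int × Char) Int × PySem.Dict Int String × Int :=
  pvExtCat.foldl
    (fun acc ec =>
      let inner :=
        ec.1.toList.reverse.foldl
          (fun (st : PySem.Dict (Int × Char) Int × Int × Int) ch =>
            match PySem.Dict.get? st.1 (st.2.2, ch) with
            | some t => (st.1, st.2.1, t)
            | none => (PySem.Dict.insert st.1 (st.2.2, ch) st.2.1, st.2.1 + 1, st.2.1))
          (acc.1, acc.2.2, (0 : Int))
      (inner.1, PySem.Dict.insert acc.2.1 inner.2.2 ec.2, inner.2.1))
    (PySem.Dict.empty, PySem.Dict.empty, 1)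

def pvTrans : PySem.Dict (Int × Char) Int := pvBuildDFA.1
def pvAccept : PySem.Dict Int String := pvBuildDFA.2.1

-- the scanning loop of _is_php_file in Source B: walk the reversed name through the DFA;
-- stop with the category at an accepting state, with none when no transition applies.
def pvWalk : Int → List Char → Option String
  | _, [] => none
  | state, ch :: rest =>
    match PySem.Dict.get? pvTrans (state, ch) with
    | none => none
    | some nxt =>
      match PySem.Dict.get? pvAccept nxt with
      | some cat => some cat
      | none => pvWalk nxt rest

def is_php_file_py_alt (filename : String) : Bool :=
  if filename = "" then false
  else
    let filename_lower := PySem.Str.lower filename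
    let cat := pvWalk 0 filename_lower.toList.reverse
    if cat = some "php" then true
    else if cat = some "html" then
      ["php", "wordpress", "drupal", "laravel", "symfony"].any
        (fun ind => PySem.Str.isIn ind filename_lower)
    else false

-- ===== PRECONDITION & SPEC =====
def Spec_is_php_file_py (filename : String) (out : Bool) : Prop := out = is_php_file_py_alt filename
instance (filename : String) (out : Bool) : Decidable (Spec_is_php_file_py filename out) := by unfold Spec_is_php_file_py; infer_instance

-- ===== CLAIM (what is proved, stated in full; the proofs are below) =====
def Claim_equal_is_php_file_py : Prop := ∀ (filename : String), Dom_is_php_file_py filename → Spec_is_php_file_py filename (is_php_file_py filename)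

-- ===== LEMMAS AND PROOFS =====

-- the DFA table pvBuildDFA evaluates to, as a literal (checked by rfl below)
def pvTransL : PySem.Dict (Int × Char) Int := PySem.Dict.mk
  [(((0 : Int), 'p'), (1 : Int)),
   (((1 : Int), 'h'), (2 : Int)),
   (((2 : Int), 'p'), (3 : Int)),
   (((3 : Int), '.'), (4 : Int)),
   (((0 : Int), 'l'), (5 : Int)),
   (((5 : Int), 'm'), (6 : Int)),
   (((6 : Int), 't'), (7 : Int)),
   (((7 : Int), 'h'), (8 : Int)),
   (((8 : Int), 'p'), (9 : Int)),
   (((9 : Int), '.'), (10 : Int)),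
   (((0 : Int), '3'), (11 : Int)),
   (((11 : Int), 'p'), (12 : Int)),
   (((12 : Int), 'h'), (13 : Int)),
   (((13 : Int), 'p'), (14 : Int)),
   (((14 : Int), '.'), (15 : Int)),
   (((0 : Int), '4'), (16 : Int)),
   (((16 : Int), 'p'), (17 : Int)),
   (((17 : Int), 'h'), (18 : Int)),
   (((18 : Int), 'p'), (19 : Int)),
   (((19 : Int), '.'), (20 : Int)),
   (((0 : Int), '5'), (21 : Int)),
   (((21 : Int), 'p'), (22 : Int)),
   (((22 : Int), 'h'), (23 : Int)),
   (((23 : Int), 'p'), (24 : Int)),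
   (((24 : Int), '.'), (25 : Int)),
   (((0 : Int), 's'), (26 : Int)),
   (((26 : Int), 'p'), (27 : Int)),
   (((27 : Int), 'h'), (28 : Int)),
   (((28 : Int), 'p'), (29 : Int)),
   (((29 : Int), '.'), (30 : Int)),
   (((0 : Int), 'c'), (31 : Int)),
   (((31 : Int), 'n'), (32 : Int)),
   (((32 : Int), 'i'), (33 : Int)),
   (((33 : Int), '.'), (34 : Int)),
   (((8 : Int), '.'), (35 : Int)),
   (((0 : Int), 'm'), (36 : Int)),
   (((36 : Int), 't'), (37 : Int)),
   (((37 : Int), 'h'), (38 : Int)),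
   (((38 : Int), '.'), (39 : Int))]

def pvAcceptL : PySem.Dict Int String := PySem.Dict.mk
  [((4 : Int), "php"), ((10 : Int), "php"), ((15 : Int), "php"), ((20 : Int), "php"), ((25 : Int), "php"), ((30 : Int), "php"), ((34 : Int), "php"), ((35 : Int), "html"), ((39 : Int), "html")]

lemma pvTrans_eqL : pvTrans = pvTransL := by decide
lemma pvAccept_eqL : pvAccept = pvAcceptL := by decide

-- endswith as "reversed suffix is a prefix of the reversed string"
lemma pv_endswith_rev (l t : List Char) :
    PySem.Chars.endswith l t = decide (t.reverse <+: l.reverse) := by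
  by_cases hs : t <:+ l
  · simp [hs, List.reverse_prefix, (PySem.Chars.endswith_iff l t).mpr hs]
  · have h2 : ¬ t.reverse <+: l.reverse := fun h => hs (List.reverse_prefix.mp h)
    simp only [h2, decide_false]
    rw [← Bool.not_eq_true]
    exact fun hh => hs ((PySem.Chars.endswith_iff l t).mp hh)

-- two prefixes of the same list: the shorter is a prefix of the longer
lemma pv_excl {r t1 t2 : List Char} (hlen : t1.length ≤ t2.length)
    (hnp : ¬ t1 <+: t2) (h1 : t1 <+: r) (h2 : t2 <+: r) : False :=
  hnp (List.prefix_of_prefix_length_le h1 h2 hlen)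

-- characterisation of the DFA walk, one lemma per non-accepting state
lemma pvw3 (r : List Char) : pvWalk 3 r = if ['.'] <+: r then some "php" else none := by
  cases r with
  | nil => simp [pvWalk, List.prefix_nil]
  | cons c cs =>
    by_cases h0 : c = '.'
    · subst h0
      simp [pvWalk, pvTrans_eqL, pvAccept_eqL, show PySem.Dict.get? pvTransL ((3 : Int), '.') = some 4 from rfl, show PySem.Dict.get? pvAcceptL (4 : Int) = some "php" from rfl, List.cons_prefix_cons]
    · 
      simp [pvWalk, pvTrans_eqL, pvTransL, PySem.Dict.get?, Prod.ext_iff, List.cons_prefix_cons, Ne.symm h0]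

lemma pvw9 (r : List Char) : pvWalk 9 r = if ['.'] <+: r then some "php" else none := by
  cases r with
  | nil => simp [pvWalk, List.prefix_nil]
  | cons c cs =>
    by_cases h0 : c = '.'
    · subst h0
      simp [pvWalk, pvTrans_eqL, pvAccept_eqL, show PySem.Dict.get? pvTransL ((9 : Int), '.') = some 10 from rfl, show PySem.Dict.get? pvAcceptL (10 : Int) = some "php" from rfl, List.cons_prefix_cons]
    · 
      simp [pvWalk, pvTrans_eqL, pvTransL, PySem.Dict.get?, Prod.ext_iff, List.cons_prefix_cons, Ne.symm h0]

lemma pvw14 (r : List Char) : pvWalk 14 r = if ['.'] <+: r then some "php" else none := by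
  cases r with
  | nil => simp [pvWalk, List.prefix_nil]
  | cons c cs =>
    by_cases h0 : c = '.'
    · subst h0
      simp [pvWalk, pvTrans_eqL, pvAccept_eqL, show PySem.Dict.get? pvTransL ((14 : Int), '.') = some 15 from rfl, show PySem.Dict.get? pvAcceptL (15 : Int) = some "php" from rfl, List.cons_prefix_cons]
    · 
      simp [pvWalk, pvTrans_eqL, pvTransL, PySem.Dict.get?, Prod.ext_iff, List.cons_prefix_cons, Ne.symm h0]

lemma pvw19 (r : List Char) : pvWalk 19 r = if ['.'] <+: r then some "php" else none := by
  cases r with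
  | nil => simp [pvWalk, List.prefix_nil]
  | cons c cs =>
    by_cases h0 : c = '.'
    · subst h0
      simp [pvWalk, pvTrans_eqL, pvAccept_eqL, show PySem.Dict.get? pvTransL ((19 : Int), '.') = some 20 from rfl, show PySem.Dict.get? pvAcceptL (20 : Int) = some "php" from rfl, List.cons_prefix_cons]
    · 
      simp [pvWalk, pvTrans_eqL, pvTransL, PySem.Dict.get?, Prod.ext_iff, List.cons_prefix_cons, Ne.symm h0]

lemma pvw24 (r : List Char) : pvWalk 24 r = if ['.'] <+: r then some "php" else none := by
  cases r with
  | nil => simp [pvWalk, List.prefix_nil]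
  | cons c cs =>
    by_cases h0 : c = '.'
    · subst h0
      simp [pvWalk, pvTrans_eqL, pvAccept_eqL, show PySem.Dict.get? pvTransL ((24 : Int), '.') = some 25 from rfl, show PySem.Dict.get? pvAcceptL (25 : Int) = some "php" from rfl, List.cons_prefix_cons]
    · 
      simp [pvWalk, pvTrans_eqL, pvTransL, PySem.Dict.get?, Prod.ext_iff, List.cons_prefix_cons, Ne.symm h0]

lemma pvw29 (r : List Char) : pvWalk 29 r = if ['.'] <+: r then some "php" else none := by
  cases r with
  | nil => simp [pvWalk, List.prefix_nil]
  | cons c cs =>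
    by_cases h0 : c = '.'
    · subst h0
      simp [pvWalk, pvTrans_eqL, pvAccept_eqL, show PySem.Dict.get? pvTransL ((29 : Int), '.') = some 30 from rfl, show PySem.Dict.get? pvAcceptL (30 : Int) = some "php" from rfl, List.cons_prefix_cons]
    · 
      simp [pvWalk, pvTrans_eqL, pvTransL, PySem.Dict.get?, Prod.ext_iff, List.cons_prefix_cons, Ne.symm h0]

lemma pvw33 (r : List Char) : pvWalk 33 r = if ['.'] <+: r then some "php" else none := by
  cases r with
  | nil => simp [pvWalk, List.prefix_nil]
  | cons c cs =>
    by_cases h0 : c = '.'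
    · subst h0
      simp [pvWalk, pvTrans_eqL, pvAccept_eqL, show PySem.Dict.get? pvTransL ((33 : Int), '.') = some 34 from rfl, show PySem.Dict.get? pvAcceptL (34 : Int) = some "php" from rfl, List.cons_prefix_cons]
    · 
      simp [pvWalk, pvTrans_eqL, pvTransL, PySem.Dict.get?, Prod.ext_iff, List.cons_prefix_cons, Ne.symm h0]

lemma pvw38 (r : List Char) : pvWalk 38 r = if ['.'] <+: r then some "html" else none := by
  cases r with
  | nil => simp [pvWalk, List.prefix_nil]
  | cons c cs =>
    by_cases h0 : c = '.'
    · subst h0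
      simp [pvWalk, pvTrans_eqL, pvAccept_eqL, show PySem.Dict.get? pvTransL ((38 : Int), '.') = some 39 from rfl, show PySem.Dict.get? pvAcceptL (39 : Int) = some "html" from rfl, List.cons_prefix_cons]
    · 
      simp [pvWalk, pvTrans_eqL, pvTransL, PySem.Dict.get?, Prod.ext_iff, List.cons_prefix_cons, Ne.symm h0]

lemma pvw2 (r : List Char) : pvWalk 2 r = if ['p', '.'] <+: r then some "php" else none := by
  cases r with
  | nil => simp [pvWalk, List.prefix_nil]
  | cons c cs =>
    by_cases h0 : c = 'p'
    · subst h0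
      simp [pvWalk, pvTrans_eqL, pvAccept_eqL, show PySem.Dict.get? pvTransL ((2 : Int), 'p') = some 3 from rfl, show PySem.Dict.get? pvAcceptL (3 : Int) = none from rfl, pvw3, List.cons_prefix_cons]
    · 
      simp [pvWalk, pvTrans_eqL, pvTransL, PySem.Dict.get?, Prod.ext_iff, List.cons_prefix_cons, Ne.symm h0]

lemma pvw8 (r : List Char) : pvWalk 8 r = if ['p', '.'] <+: r then some "php" else if ['.'] <+: r then some "html" else none := by
  cases r with
  | nil => simp [pvWalk, List.prefix_nil]
  | cons c cs =>
    by_cases h0 : c = 'p'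
    · subst h0
      simp [pvWalk, pvTrans_eqL, pvAccept_eqL, show PySem.Dict.get? pvTransL ((8 : Int), 'p') = some 9 from rfl, show PySem.Dict.get? pvAcceptL (9 : Int) = none from rfl, pvw9, List.cons_prefix_cons]
    · 
      by_cases h1 : c = '.'
      · subst h1
        simp [pvWalk, pvTrans_eqL, pvAccept_eqL, show PySem.Dict.get? pvTransL ((8 : Int), '.') = some 35 from rfl, show PySem.Dict.get? pvAcceptL (35 : Int) = some "html" from rfl, List.cons_prefix_cons]
      · 
        simp [pvWalk, pvTrans_eqL, pvTransL, PySem.Dict.get?, Prod.ext_iff, List.cons_prefix_cons, Ne.symm h0, Ne.symm h1]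

lemma pvw13 (r : List Char) : pvWalk 13 r = if ['p', '.'] <+: r then some "php" else none := by
  cases r with
  | nil => simp [pvWalk, List.prefix_nil]
  | cons c cs =>
    by_cases h0 : c = 'p'
    · subst h0
      simp [pvWalk, pvTrans_eqL, pvAccept_eqL, show PySem.Dict.get? pvTransL ((13 : Int), 'p') = some 14 from rfl, show PySem.Dict.get? pvAcceptL (14 : Int) = none from rfl, pvw14, List.cons_prefix_cons]
    · 
      simp [pvWalk, pvTrans_eqL, pvTransL, PySem.Dict.get?, Prod.ext_iff, List.cons_prefix_cons, Ne.symm h0]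

lemma pvw18 (r : List Char) : pvWalk 18 r = if ['p', '.'] <+: r then some "php" else none := by
  cases r with
  | nil => simp [pvWalk, List.prefix_nil]
  | cons c cs =>
    by_cases h0 : c = 'p'
    · subst h0
      simp [pvWalk, pvTrans_eqL, pvAccept_eqL, show PySem.Dict.get? pvTransL ((18 : Int), 'p') = some 19 from rfl, show PySem.Dict.get? pvAcceptL (19 : Int) = none from rfl, pvw19, List.cons_prefix_cons]
    · 
      simp [pvWalk, pvTrans_eqL, pvTransL, PySem.Dict.get?, Prod.ext_iff, List.cons_prefix_cons, Ne.symm h0]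

lemma pvw23 (r : List Char) : pvWalk 23 r = if ['p', '.'] <+: r then some "php" else none := by
  cases r with
  | nil => simp [pvWalk, List.prefix_nil]
  | cons c cs =>
    by_cases h0 : c = 'p'
    · subst h0
      simp [pvWalk, pvTrans_eqL, pvAccept_eqL, show PySem.Dict.get? pvTransL ((23 : Int), 'p') = some 24 from rfl, show PySem.Dict.get? pvAcceptL (24 : Int) = none from rfl, pvw24, List.cons_prefix_cons]
    · 
      simp [pvWalk, pvTrans_eqL, pvTransL, PySem.Dict.get?, Prod.ext_iff, List.cons_prefix_cons, Ne.symm h0]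

lemma pvw28 (r : List Char) : pvWalk 28 r = if ['p', '.'] <+: r then some "php" else none := by
  cases r with
  | nil => simp [pvWalk, List.prefix_nil]
  | cons c cs =>
    by_cases h0 : c = 'p'
    · subst h0
      simp [pvWalk, pvTrans_eqL, pvAccept_eqL, show PySem.Dict.get? pvTransL ((28 : Int), 'p') = some 29 from rfl, show PySem.Dict.get? pvAcceptL (29 : Int) = none from rfl, pvw29, List.cons_prefix_cons]
    · 
      simp [pvWalk, pvTrans_eqL, pvTransL, PySem.Dict.get?, Prod.ext_iff, List.cons_prefix_cons, Ne.symm h0]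

lemma pvw32 (r : List Char) : pvWalk 32 r = if ['i', '.'] <+: r then some "php" else none := by
  cases r with
  | nil => simp [pvWalk, List.prefix_nil]
  | cons c cs =>
    by_cases h0 : c = 'i'
    · subst h0
      simp [pvWalk, pvTrans_eqL, pvAccept_eqL, show PySem.Dict.get? pvTransL ((32 : Int), 'i') = some 33 from rfl, show PySem.Dict.get? pvAcceptL (33 : Int) = none from rfl, pvw33, List.cons_prefix_cons]
    · 
      simp [pvWalk, pvTrans_eqL, pvTransL, PySem.Dict.get?, Prod.ext_iff, List.cons_prefix_cons, Ne.symm h0]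

lemma pvw37 (r : List Char) : pvWalk 37 r = if ['h', '.'] <+: r then some "html" else none := by
  cases r with
  | nil => simp [pvWalk, List.prefix_nil]
  | cons c cs =>
    by_cases h0 : c = 'h'
    · subst h0
      simp [pvWalk, pvTrans_eqL, pvAccept_eqL, show PySem.Dict.get? pvTransL ((37 : Int), 'h') = some 38 from rfl, show PySem.Dict.get? pvAcceptL (38 : Int) = none from rfl, pvw38, List.cons_prefix_cons]
    · 
      simp [pvWalk, pvTrans_eqL, pvTransL, PySem.Dict.get?, Prod.ext_iff, List.cons_prefix_cons, Ne.symm h0]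

lemma pvw1 (r : List Char) : pvWalk 1 r = if ['h', 'p', '.'] <+: r then some "php" else none := by
  cases r with
  | nil => simp [pvWalk, List.prefix_nil]
  | cons c cs =>
    by_cases h0 : c = 'h'
    · subst h0
      simp [pvWalk, pvTrans_eqL, pvAccept_eqL, show PySem.Dict.get? pvTransL ((1 : Int), 'h') = some 2 from rfl, show PySem.Dict.get? pvAcceptL (2 : Int) = none from rfl, pvw2, List.cons_prefix_cons]
    · 
      simp [pvWalk, pvTrans_eqL, pvTransL, PySem.Dict.get?, Prod.ext_iff, List.cons_prefix_cons, Ne.symm h0]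

lemma pvw7 (r : List Char) : pvWalk 7 r = if ['h', 'p', '.'] <+: r then some "php" else if ['h', '.'] <+: r then some "html" else none := by
  cases r with
  | nil => simp [pvWalk, List.prefix_nil]
  | cons c cs =>
    by_cases h0 : c = 'h'
    · subst h0
      simp [pvWalk, pvTrans_eqL, pvAccept_eqL, show PySem.Dict.get? pvTransL ((7 : Int), 'h') = some 8 from rfl, show PySem.Dict.get? pvAcceptL (8 : Int) = none from rfl, pvw8, List.cons_prefix_cons]
    · 
      simp [pvWalk, pvTrans_eqL, pvTransL, PySem.Dict.get?, Prod.ext_iff, List.cons_prefix_cons, Ne.symm h0]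

lemma pvw12 (r : List Char) : pvWalk 12 r = if ['h', 'p', '.'] <+: r then some "php" else none := by
  cases r with
  | nil => simp [pvWalk, List.prefix_nil]
  | cons c cs =>
    by_cases h0 : c = 'h'
    · subst h0
      simp [pvWalk, pvTrans_eqL, pvAccept_eqL, show PySem.Dict.get? pvTransL ((12 : Int), 'h') = some 13 from rfl, show PySem.Dict.get? pvAcceptL (13 : Int) = none from rfl, pvw13, List.cons_prefix_cons]
    · 
      simp [pvWalk, pvTrans_eqL, pvTransL, PySem.Dict.get?, Prod.ext_iff, List.cons_prefix_cons, Ne.symm h0]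

lemma pvw17 (r : List Char) : pvWalk 17 r = if ['h', 'p', '.'] <+: r then some "php" else none := by
  cases r with
  | nil => simp [pvWalk, List.prefix_nil]
  | cons c cs =>
    by_cases h0 : c = 'h'
    · subst h0
      simp [pvWalk, pvTrans_eqL, pvAccept_eqL, show PySem.Dict.get? pvTransL ((17 : Int), 'h') = some 18 from rfl, show PySem.Dict.get? pvAcceptL (18 : Int) = none from rfl, pvw18, List.cons_prefix_cons]
    · 
      simp [pvWalk, pvTrans_eqL, pvTransL, PySem.Dict.get?, Prod.ext_iff, List.cons_prefix_cons, Ne.symm h0]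

lemma pvw22 (r : List Char) : pvWalk 22 r = if ['h', 'p', '.'] <+: r then some "php" else none := by
  cases r with
  | nil => simp [pvWalk, List.prefix_nil]
  | cons c cs =>
    by_cases h0 : c = 'h'
    · subst h0
      simp [pvWalk, pvTrans_eqL, pvAccept_eqL, show PySem.Dict.get? pvTransL ((22 : Int), 'h') = some 23 from rfl, show PySem.Dict.get? pvAcceptL (23 : Int) = none from rfl, pvw23, List.cons_prefix_cons]
    · 
      simp [pvWalk, pvTrans_eqL, pvTransL, PySem.Dict.get?, Prod.ext_iff, List.cons_prefix_cons, Ne.symm h0]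

lemma pvw27 (r : List Char) : pvWalk 27 r = if ['h', 'p', '.'] <+: r then some "php" else none := by
  cases r with
  | nil => simp [pvWalk, List.prefix_nil]
  | cons c cs =>
    by_cases h0 : c = 'h'
    · subst h0
      simp [pvWalk, pvTrans_eqL, pvAccept_eqL, show PySem.Dict.get? pvTransL ((27 : Int), 'h') = some 28 from rfl, show PySem.Dict.get? pvAcceptL (28 : Int) = none from rfl, pvw28, List.cons_prefix_cons]
    · 
      simp [pvWalk, pvTrans_eqL, pvTransL, PySem.Dict.get?, Prod.ext_iff, List.cons_prefix_cons, Ne.symm h0]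

lemma pvw31 (r : List Char) : pvWalk 31 r = if ['n', 'i', '.'] <+: r then some "php" else none := by
  cases r with
  | nil => simp [pvWalk, List.prefix_nil]
  | cons c cs =>
    by_cases h0 : c = 'n'
    · subst h0
      simp [pvWalk, pvTrans_eqL, pvAccept_eqL, show PySem.Dict.get? pvTransL ((31 : Int), 'n') = some 32 from rfl, show PySem.Dict.get? pvAcceptL (32 : Int) = none from rfl, pvw32, List.cons_prefix_cons]
    · 
      simp [pvWalk, pvTrans_eqL, pvTransL, PySem.Dict.get?, Prod.ext_iff, List.cons_prefix_cons, Ne.symm h0]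

lemma pvw36 (r : List Char) : pvWalk 36 r = if ['t', 'h', '.'] <+: r then some "html" else none := by
  cases r with
  | nil => simp [pvWalk, List.prefix_nil]
  | cons c cs =>
    by_cases h0 : c = 't'
    · subst h0
      simp [pvWalk, pvTrans_eqL, pvAccept_eqL, show PySem.Dict.get? pvTransL ((36 : Int), 't') = some 37 from rfl, show PySem.Dict.get? pvAcceptL (37 : Int) = none from rfl, pvw37, List.cons_prefix_cons]
    · 
      simp [pvWalk, pvTrans_eqL, pvTransL, PySem.Dict.get?, Prod.ext_iff, List.cons_prefix_cons, Ne.symm h0]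

lemma pvw6 (r : List Char) : pvWalk 6 r = if ['t', 'h', 'p', '.'] <+: r then some "php" else if ['t', 'h', '.'] <+: r then some "html" else none := by
  cases r with
  | nil => simp [pvWalk, List.prefix_nil]
  | cons c cs =>
    by_cases h0 : c = 't'
    · subst h0
      simp [pvWalk, pvTrans_eqL, pvAccept_eqL, show PySem.Dict.get? pvTransL ((6 : Int), 't') = some 7 from rfl, show PySem.Dict.get? pvAcceptL (7 : Int) = none from rfl, pvw7, List.cons_prefix_cons]
    · 
      simp [pvWalk, pvTrans_eqL, pvTransL, PySem.Dict.get?, Prod.ext_iff, List.cons_prefix_cons, Ne.symm h0]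

lemma pvw11 (r : List Char) : pvWalk 11 r = if ['p', 'h', 'p', '.'] <+: r then some "php" else none := by
  cases r with
  | nil => simp [pvWalk, List.prefix_nil]
  | cons c cs =>
    by_cases h0 : c = 'p'
    · subst h0
      simp [pvWalk, pvTrans_eqL, pvAccept_eqL, show PySem.Dict.get? pvTransL ((11 : Int), 'p') = some 12 from rfl, show PySem.Dict.get? pvAcceptL (12 : Int) = none from rfl, pvw12, List.cons_prefix_cons]
    · 
      simp [pvWalk, pvTrans_eqL, pvTransL, PySem.Dict.get?, Prod.ext_iff, List.cons_prefix_cons, Ne.symm h0]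

lemma pvw16 (r : List Char) : pvWalk 16 r = if ['p', 'h', 'p', '.'] <+: r then some "php" else none := by
  cases r with
  | nil => simp [pvWalk, List.prefix_nil]
  | cons c cs =>
    by_cases h0 : c = 'p'
    · subst h0
      simp [pvWalk, pvTrans_eqL, pvAccept_eqL, show PySem.Dict.get? pvTransL ((16 : Int), 'p') = some 17 from rfl, show PySem.Dict.get? pvAcceptL (17 : Int) = none from rfl, pvw17, List.cons_prefix_cons]
    · 
      simp [pvWalk, pvTrans_eqL, pvTransL, PySem.Dict.get?, Prod.ext_iff, List.cons_prefix_cons, Ne.symm h0]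

lemma pvw21 (r : List Char) : pvWalk 21 r = if ['p', 'h', 'p', '.'] <+: r then some "php" else none := by
  cases r with
  | nil => simp [pvWalk, List.prefix_nil]
  | cons c cs =>
    by_cases h0 : c = 'p'
    · subst h0
      simp [pvWalk, pvTrans_eqL, pvAccept_eqL, show PySem.Dict.get? pvTransL ((21 : Int), 'p') = some 22 from rfl, show PySem.Dict.get? pvAcceptL (22 : Int) = none from rfl, pvw22, List.cons_prefix_cons]
    · 
      simp [pvWalk, pvTrans_eqL, pvTransL, PySem.Dict.get?, Prod.ext_iff, List.cons_prefix_cons, Ne.symm h0]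

lemma pvw26 (r : List Char) : pvWalk 26 r = if ['p', 'h', 'p', '.'] <+: r then some "php" else none := by
  cases r with
  | nil => simp [pvWalk, List.prefix_nil]
  | cons c cs =>
    by_cases h0 : c = 'p'
    · subst h0
      simp [pvWalk, pvTrans_eqL, pvAccept_eqL, show PySem.Dict.get? pvTransL ((26 : Int), 'p') = some 27 from rfl, show PySem.Dict.get? pvAcceptL (27 : Int) = none from rfl, pvw27, List.cons_prefix_cons]
    · 
      simp [pvWalk, pvTrans_eqL, pvTransL, PySem.Dict.get?, Prod.ext_iff, List.cons_prefix_cons, Ne.symm h0]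

lemma pvw5 (r : List Char) : pvWalk 5 r = if ['m', 't', 'h', 'p', '.'] <+: r then some "php" else if ['m', 't', 'h', '.'] <+: r then some "html" else none := by
  cases r with
  | nil => simp [pvWalk, List.prefix_nil]
  | cons c cs =>
    by_cases h0 : c = 'm'
    · subst h0
      simp [pvWalk, pvTrans_eqL, pvAccept_eqL, show PySem.Dict.get? pvTransL ((5 : Int), 'm') = some 6 from rfl, show PySem.Dict.get? pvAcceptL (6 : Int) = none from rfl, pvw6, List.cons_prefix_cons]
    · 
      simp [pvWalk, pvTrans_eqL, pvTransL, PySem.Dict.get?, Prod.ext_iff, List.cons_prefix_cons, Ne.symm h0]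

lemma pvw0 (r : List Char) : pvWalk 0 r = if ['p', 'h', 'p', '.'] <+: r then some "php" else if ['l', 'm', 't', 'h', 'p', '.'] <+: r then some "php" else if ['l', 'm', 't', 'h', '.'] <+: r then some "html" else if ['3', 'p', 'h', 'p', '.'] <+: r then some "php" else if ['4', 'p', 'h', 'p', '.'] <+: r then some "php" else if ['5', 'p', 'h', 'p', '.'] <+: r then some "php" else if ['s', 'p', 'h', 'p', '.'] <+: r then some "php" else if ['c', 'n', 'i', '.'] <+: r then some "php" else if ['m', 't', 'h', '.'] <+: r then some "html" else none := by
  cases r with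
  | nil => simp [pvWalk, List.prefix_nil]
  | cons c cs =>
    by_cases h0 : c = 'p'
    · subst h0
      simp [pvWalk, pvTrans_eqL, pvAccept_eqL, show PySem.Dict.get? pvTransL ((0 : Int), 'p') = some 1 from rfl, show PySem.Dict.get? pvAcceptL (1 : Int) = none from rfl, pvw1, List.cons_prefix_cons]
    · 
      by_cases h1 : c = 'l'
      · subst h1
        simp [pvWalk, pvTrans_eqL, pvAccept_eqL, show PySem.Dict.get? pvTransL ((0 : Int), 'l') = some 5 from rfl, show PySem.Dict.get? pvAcceptL (5 : Int) = none from rfl, pvw5, List.cons_prefix_cons]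
      · 
        by_cases h2 : c = '3'
        · subst h2
          simp [pvWalk, pvTrans_eqL, pvAccept_eqL, show PySem.Dict.get? pvTransL ((0 : Int), '3') = some 11 from rfl, show PySem.Dict.get? pvAcceptL (11 : Int) = none from rfl, pvw11, List.cons_prefix_cons]
        · 
          by_cases h3 : c = '4'
          · subst h3
            simp [pvWalk, pvTrans_eqL, pvAccept_eqL, show PySem.Dict.get? pvTransL ((0 : Int), '4') = some 16 from rfl, show PySem.Dict.get? pvAcceptL (16 : Int) = none from rfl, pvw16, List.cons_prefix_cons]
          · 
            by_cases h4 : c = '5'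
            · subst h4
              simp [pvWalk, pvTrans_eqL, pvAccept_eqL, show PySem.Dict.get? pvTransL ((0 : Int), '5') = some 21 from rfl, show PySem.Dict.get? pvAcceptL (21 : Int) = none from rfl, pvw21, List.cons_prefix_cons]
            · 
              by_cases h5 : c = 's'
              · subst h5
                simp [pvWalk, pvTrans_eqL, pvAccept_eqL, show PySem.Dict.get? pvTransL ((0 : Int), 's') = some 26 from rfl, show PySem.Dict.get? pvAcceptL (26 : Int) = none from rfl, pvw26, List.cons_prefix_cons]
              · 
                by_cases h6 : c = 'c'
                · subst h6
                  simp [pvWalk, pvTrans_eqL, pvAccept_eqL, show PySem.Dict.get? pvTransL ((0 : Int), 'c') = some 31 from rfl, show PySem.Dict.get? pvAcceptL (31 : Int) = none from rfl, pvw31, List.cons_prefix_cons]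
                · 
                  by_cases h7 : c = 'm'
                  · subst h7
                    simp [pvWalk, pvTrans_eqL, pvAccept_eqL, show PySem.Dict.get? pvTransL ((0 : Int), 'm') = some 36 from rfl, show PySem.Dict.get? pvAcceptL (36 : Int) = none from rfl, pvw36, List.cons_prefix_cons]
                  · 
                    simp [pvWalk, pvTrans_eqL, pvTransL, PySem.Dict.get?, Prod.ext_iff, List.cons_prefix_cons, Ne.symm h0, Ne.symm h1, Ne.symm h2, Ne.symm h3, Ne.symm h4, Ne.symm h5, Ne.symm h6, Ne.symm h7]

-- ===== VERDICT (by name: the statement is the Claim_ definition above) =====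
theorem is_php_file_py_spec : Claim_equal_is_php_file_py := by
  intro filename _
  unfold Spec_is_php_file_py is_php_file_py is_php_file_py_alt
  by_cases h0 : filename = ""
  · simp [h0]
  · rw [if_neg h0, if_neg h0]
    set l := (PySem.Str.lower filename).toList with hl
    set r := l.reverse with hr
    have e1 : PySem.Str.endswith (PySem.Str.lower filename) ".php"
        = decide (['p','h','p','.'] <+: r) := by
      rw [PySem.Str.endswith_eq, ← hl, pv_endswith_rev, ← hr]; rfl
    have e2 : PySem.Str.endswith (PySem.Str.lower filename) ".phtml"
        = decide (['l','m','t','h','p','.'] <+: r) := by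
      rw [PySem.Str.endswith_eq, ← hl, pv_endswith_rev, ← hr]; rfl
    have e3 : PySem.Str.endswith (PySem.Str.lower filename) ".php3"
        = decide (['3','p','h','p','.'] <+: r) := by
      rw [PySem.Str.endswith_eq, ← hl, pv_endswith_rev, ← hr]; rfl
    have e4 : PySem.Str.endswith (PySem.Str.lower filename) ".php4"
        = decide (['4','p','h','p','.'] <+: r) := by
      rw [PySem.Str.endswith_eq, ← hl, pv_endswith_rev, ← hr]; rfl
    have e5 : PySem.Str.endswith (PySem.Str.lower filename) ".php5"
        = decide (['5','p','h','p','.'] <+: r) := by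
      rw [PySem.Str.endswith_eq, ← hl, pv_endswith_rev, ← hr]; rfl
    have e6 : PySem.Str.endswith (PySem.Str.lower filename) ".phps"
        = decide (['s','p','h','p','.'] <+: r) := by
      rw [PySem.Str.endswith_eq, ← hl, pv_endswith_rev, ← hr]; rfl
    have e7 : PySem.Str.endswith (PySem.Str.lower filename) ".inc"
        = decide (['c','n','i','.'] <+: r) := by
      rw [PySem.Str.endswith_eq, ← hl, pv_endswith_rev, ← hr]; rfl
    have e8 : PySem.Str.endswith (PySem.Str.lower filename) ".html"
        = decide (['l','m','t','h','.'] <+: r) := by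
      rw [PySem.Str.endswith_eq, ← hl, pv_endswith_rev, ← hr]; rfl
    have e9 : PySem.Str.endswith (PySem.Str.lower filename) ".htm"
        = decide (['m','t','h','.'] <+: r) := by
      rw [PySem.Str.endswith_eq, ← hl, pv_endswith_rev, ← hr]; rfl
    have hwalk : pvWalk 0 (PySem.Str.lower filename).toList.reverse = pvWalk 0 r := by
      rw [← hl, ← hr]
    simp only [List.any_cons, List.any_nil, e1, e2, e3, e4, e5, e6, e7, e8, e9, hwalk, pvw0]
    by_cases q1 : ['p','h','p','.'] <+: r
    · simp [q1]
    · by_cases q3 : ['l','m','t','h','p','.'] <+: r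
      · simp [q1, q3]
      · by_cases q2 : ['l','m','t','h','.'] <+: r
        · have n4 : ¬ ['3','p','h','p','.'] <+: r := fun h =>
            pv_excl (t1 := ['l','m','t','h','.']) (by decide) (by decide) q2 h
          have n5 : ¬ ['4','p','h','p','.'] <+: r := fun h =>
            pv_excl (t1 := ['l','m','t','h','.']) (by decide) (by decide) q2 h
          have n6 : ¬ ['5','p','h','p','.'] <+: r := fun h =>
            pv_excl (t1 := ['l','m','t','h','.']) (by decide) (by decide) q2 h
          have n7 : ¬ ['s','p','h','p','.'] <+: r := fun h =>
            pv_excl (t1 := ['l','m','t','h','.']) (by decide) (by decide) q2 h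
          have n8 : ¬ ['c','n','i','.'] <+: r := fun h =>
            pv_excl (t1 := ['c','n','i','.']) (by decide) (by decide) h q2
          simp [q1, q3, q2, n4, n5, n6, n7, n8]
        · by_cases q4 : ['3','p','h','p','.'] <+: r
          · simp [q1, q3, q2, q4]
          · by_cases q5 : ['4','p','h','p','.'] <+: r
            · simp [q1, q3, q2, q4, q5]
            · by_cases q6 : ['5','p','h','p','.'] <+: r
              · simp [q1, q3, q2, q4, q5, q6]
              · by_cases q7 : ['s','p','h','p','.'] <+: r
                · simp [q1, q3, q2, q4, q5, q6, q7]
                · by_cases q8 : ['c','n','i','.'] <+: r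
                  · simp [q1, q3, q2, q4, q5, q6, q7, q8]
                  · by_cases q9 : ['m','t','h','.'] <+: r
                    · simp [q1, q3, q2, q4, q5, q6, q7, q8, q9]
                    · simp [q1, q3, q2, q4, q5, q6, q7, q8, q9]
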